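-- pv_equiv track=rewrite | github.com/Tinus1424/thesis | old.py | compute_windows
-- ===== SOURCE A (Python) =====
-- def compute_windows(n_timesteps, p):
--     """
--     Helper function for augment()
--
--     """
--     windows = {}
--
--     window_size = n_timesteps // p
--     remainder = n_timesteps % p
--
--     start = 0
--     for i in range(1, p +1):
--         end = start + window_size + (1 if i <= remainder else 0)
--         windows[i] = (start, end -1)
--         start = end
--
--     return windows
-- ===== SOURCE B (Python) =====
-- def compute_windows(n_timesteps, p):
--     window_size = n_timesteps // p
--     remainder = n_timesteps % p
--     return {i: ((i - 1) * window_size + min(i - 1, remainder),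
--                 i * window_size + min(i, remainder) - 1)
--             for i in range(1, p + 1)}
-- ===== Notes on version B (the rewrite author's own statement) =====
-- stated objective: alternative
-- what changed: Replaces the loop-carried running 'start' accumulator with a closed-form per-index dict comprehension: window i's bounds are computed independently as (i-1)*w + min(i-1, r) and i*w + min(i, r) - 1.
-- outside the precondition, e.g. on compute_windows(10, 0): A raises ZeroDivisionError, B raises ZeroDivisionError
import Mathlib
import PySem

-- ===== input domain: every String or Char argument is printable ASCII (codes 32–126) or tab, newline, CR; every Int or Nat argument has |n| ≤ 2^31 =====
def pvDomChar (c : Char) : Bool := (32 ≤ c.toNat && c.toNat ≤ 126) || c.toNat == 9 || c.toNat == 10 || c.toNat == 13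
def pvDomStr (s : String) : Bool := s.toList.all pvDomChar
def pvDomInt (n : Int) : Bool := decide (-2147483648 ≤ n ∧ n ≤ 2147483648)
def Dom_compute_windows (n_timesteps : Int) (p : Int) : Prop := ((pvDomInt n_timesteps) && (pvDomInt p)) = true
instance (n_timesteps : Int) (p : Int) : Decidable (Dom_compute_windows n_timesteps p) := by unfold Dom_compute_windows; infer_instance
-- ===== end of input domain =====

-- B replaces A's loop-carried running start with a closed-form per-index map; same O(p) cost (alternative decomposition).


-- ===== PORT A =====
-- dict windows with int keys → PySem.Dict Int (Int × Int); result is its items list (Int × (Int × Int) = Int × Int × Int)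
def compute_windows (n_timesteps : Int) (p : Int) : List (Int × Int × Int) :=
  let window_size := PySem.Int.floordiv n_timesteps p
  let remainder := PySem.Int.mod n_timesteps p
  let st := (PySem.List.pyRange 1 (p + 1) 1).foldl
    (fun (acc : PySem.Dict Int (Int × Int) × Int) i =>
      let e := acc.2 + window_size + (if i ≤ remainder then 1 else 0)
      (acc.1.insert i (acc.2, e - 1), e))
    (PySem.Dict.empty, 0)
  st.1.items

-- ===== PORT B =====
def compute_windows_alt (n_timesteps : Int) (p : Int) : List (Int × Int × Int) :=
  let window_size := PySem.Int.floordiv n_timesteps p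
  let remainder := PySem.Int.mod n_timesteps p
  (PySem.List.pyRange 1 (p + 1) 1).map
    (fun i => (i, (i - 1) * window_size + min (i - 1) remainder,
                  i * window_size + min i remainder - 1))

-- ===== PRECONDITION & SPEC =====
-- A raises ZeroDivisionError when p = 0; that is the only exception.
def Pre_compute_windows (n_timesteps : Int) (p : Int) : Prop := p ≠ 0
instance (n_timesteps : Int) (p : Int) : Decidable (Pre_compute_windows n_timesteps p) := by unfold Pre_compute_windows; infer_instance
def pvWitness_compute_windows : Int × Int := (10, 3)

def Spec_compute_windows (n_timesteps : Int) (p : Int) (out : List (Int × Int × Int)) : Prop := out = compute_windows_alt n_timesteps p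
instance (n_timesteps : Int) (p : Int) (out : List (Int × Int × Int)) : Decidable (Spec_compute_windows n_timesteps p out) := by unfold Spec_compute_windows; infer_instance

-- ===== CLAIM (what is proved, stated in full; the proofs are below) =====
def Claim_equal_compute_windows : Prop := ∀ (n_timesteps : Int) (p : Int), Dom_compute_windows n_timesteps p → Pre_compute_windows n_timesteps p → Spec_compute_windows n_timesteps p (compute_windows n_timesteps p)

-- ===== LEMMAS AND PROOFS =====

-- Loop invariant: after the first m iterations the dict holds the closed-form windows
-- for i = 1..m and the running start equals m*w + min m r.
lemma compute_windows_loop (w r : Int) (hr : 0 ≤ r) (m : Nat) :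
    (PySem.List.pyRange 1 ((m : Int) + 1) 1).foldl
      (fun (acc : PySem.Dict Int (Int × Int) × Int) i =>
        let e := acc.2 + w + (if i ≤ r then 1 else 0)
        (acc.1.insert i (acc.2, e - 1), e))
      (PySem.Dict.empty, 0)
    = (PySem.Dict.mk ((PySem.List.pyRange 1 ((m : Int) + 1) 1).map
        (fun i => (i, (i - 1) * w + min (i - 1) r, i * w + min i r - 1))),
       (m : Int) * w + min (m : Int) r) := by
  induction m with
  | zero =>
      rw [show (((0:Nat):Int) + 1) = 1 by norm_num, PySem.List.pyRange_one_eq_nil (le_refl 1)]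
      simp only [List.foldl_nil, List.map_nil, Prod.mk.injEq]
      exact ⟨rfl, by omega⟩
  | succ m ih =>
      have hsp : ((m : Int) + 1 : Int) + 1 = (((m + 1 : Nat) : Int)) + 1 := by push_cast; ring
      rw [show (((m + 1 : Nat) : Int) + 1) = ((m : Int) + 1) + 1 by push_cast; ring]
      rw [PySem.List.pyRange_one_succ_right (by omega : (1:Int) ≤ (m : Int) + 1)]
      rw [List.foldl_append, List.map_append, ih]
      simp only [List.foldl_cons, List.foldl_nil, List.map_cons, List.map_nil]
      have hfresh : (PySem.Dict.mk ((PySem.List.pyRange 1 ((m : Int) + 1) 1).map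
          (fun i => (i, (i - 1) * w + min (i - 1) r, i * w + min i r - 1)))).contains ((m : Int) + 1) = false := by
        rw [PySem.Dict.contains_eq_decide_mem_keys]
        simp only [PySem.Dict.keys_mk, List.map_map, decide_eq_false_iff_not]
        intro hmem
        rcases List.mem_map.1 hmem with ⟨i, hi, hik⟩
        have := (PySem.List.mem_pyRange_one).1 hi
        simp only [Function.comp] at hik
        omega
      rw [Prod.mk.injEq]
      refine ⟨?_, by push_cast; simp only [min_def]; split_ifs <;> ring_nf <;> linarith⟩
      apply PySem.Dict.ext
      rw [PySem.Dict.items_insert_of_not_contains (h := hfresh)]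
      congr 1
      simp only [List.cons.injEq, and_true, Prod.mk.injEq]
      refine ⟨trivial, ?_, ?_⟩ <;> (push_cast; simp only [min_def]; split_ifs <;> ring_nf <;> linarith)

lemma compute_windows_neg (n p : Int) (hp : p < 0) :
    compute_windows n p = [] ∧ compute_windows_alt n p = [] := by
  unfold compute_windows compute_windows_alt
  rw [PySem.List.pyRange_one_eq_nil (by omega : p + 1 ≤ 1)]
  exact ⟨rfl, rfl⟩

-- ===== VERDICT (by name: the statement is the Claim_ definition above) =====
theorem compute_windows_spec : Claim_equal_compute_windows := by
  intro n p _ hp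
  unfold Spec_compute_windows
  rcases lt_trichotomy p 0 with h | h | h
  · have := compute_windows_neg n p h
    rw [this.1, this.2]
  · exact absurd h hp
  · -- p > 0
    have hr : 0 ≤ PySem.Int.mod n p := PySem.Int.mod_nonneg n h
    have hm : p = ((p.toNat : Int)) := by omega
    simp only [compute_windows, compute_windows_alt]
    rw [hm] at hr ⊢
    rw [compute_windows_loop (PySem.Int.floordiv n (p.toNat : Int)) (PySem.Int.mod n (p.toNat : Int)) hr p.toNat]
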